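-- pv_equiv track=rewrite | github.com/MikeAlwaysCode/algorithm_py | Contests/LeetCodePython/Test.py | minimizeSet
-- ===== SOURCE A (Python) =====
-- import math
--
-- def minimizeSet(divisor1: int, divisor2: int, uniqueCnt1: int, uniqueCnt2: int) -> int:
--     dlcm = math.lcm(divisor1, divisor2)
--
--     def check(x) -> bool:
--         ab = x // dlcm
--         a = x // divisor1
--         b = x // divisor2
--         return (x - ab) >= (uniqueCnt1 + uniqueCnt2) and (x - a) >= uniqueCnt1 and (x - b) >= uniqueCnt2
--
--     l, r = 1, 10 ** 15
--     while l < r: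
--         mid = l + r >> 1
--         if check(mid):
--             r = mid
--         else:
--             l =  mid + 1
--     return r
-- ===== SOURCE B (Python) =====
-- import math
--
--
-- def _first_x(d: int, c: int) -> int:
--     """Smallest positive x such that [1, x] contains at least c integers not divisible by d."""
--     if c <= 0:
--         return 1
--     q, r = divmod(c - 1, d - 1)
--     return q * d + r + 1
--
--
-- def minimizeSet(divisor1: int, divisor2: int, uniqueCnt1: int, uniqueCnt2: int) -> int:
--     return max(_first_x(divisor1, uniqueCnt1),
--                _first_x(divisor2, uniqueCnt2),
--                _first_x(math.lcm(divisor1, divisor2), uniqueCnt1 + uniqueCnt2))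
-- ===== Notes on version B (the rewrite author's own statement) =====
-- stated objective: faster
-- what changed: Replaces the binary search over [1, 10**15] (~50 evaluations of a three-divisor check) by a closed form: the answer is the max of three per-constraint thresholds, each one divmod; Pre_ excludes divisor 0 (A raises) and the infeasible cases where divisor1, divisor2 or their lcm is 1 with a positive corresponding count, where A returns its search cap 10**15 (not an answer) and B's closed form raises ZeroDivisionError.
-- outside the precondition, e.g. on minimizeSet(1, 2, 3, 4): A returns 1000000000000000, B raises ZeroDivisionError; on minimizeSet(-1, -1, 1, 1): A returns 1000000000000000, B raises ZeroDivisionError; on minimizeSet(0, 2, 1, 1): A raises ZeroDivisionError, B returns 1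
import Mathlib
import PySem

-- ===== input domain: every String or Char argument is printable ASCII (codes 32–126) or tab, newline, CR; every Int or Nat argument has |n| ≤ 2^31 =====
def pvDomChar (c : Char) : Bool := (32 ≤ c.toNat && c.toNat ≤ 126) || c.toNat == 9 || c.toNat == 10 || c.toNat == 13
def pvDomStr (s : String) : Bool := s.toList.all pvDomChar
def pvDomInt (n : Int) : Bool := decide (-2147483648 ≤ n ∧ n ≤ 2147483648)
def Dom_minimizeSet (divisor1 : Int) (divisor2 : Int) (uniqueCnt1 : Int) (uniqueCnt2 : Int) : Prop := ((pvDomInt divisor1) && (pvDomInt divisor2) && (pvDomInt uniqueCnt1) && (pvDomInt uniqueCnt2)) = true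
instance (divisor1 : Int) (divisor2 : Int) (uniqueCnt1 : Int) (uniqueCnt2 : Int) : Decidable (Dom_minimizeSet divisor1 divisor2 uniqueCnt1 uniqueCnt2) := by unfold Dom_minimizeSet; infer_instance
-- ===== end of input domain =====

-- B replaces A's binary search over [1, 10^15] by a closed-form answer: the max of three
-- per-constraint thresholds (objective: faster — O(1) arithmetic instead of ~50 check evaluations).

-- ===== PORT A =====
-- math.lcm(a, b): the nonnegative lcm of |a| and |b| — Lean's Int.lcm (exact).
-- the inner 'check(x)'
def pvCheckA (dlcm divisor1 divisor2 uniqueCnt1 uniqueCnt2 x : Int) : Bool :=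
  let ab := PySem.Int.floordiv x dlcm
  let a := PySem.Int.floordiv x divisor1
  let b := PySem.Int.floordiv x divisor2
  decide (x - ab ≥ uniqueCnt1 + uniqueCnt2) && (decide (x - a ≥ uniqueCnt1) && decide (x - b ≥ uniqueCnt2))

-- the 'while l < r' loop; 'l + r >> 1' is floor division of l + r by 2
def pvLoopA (check : Int → Bool) (l r : Int) : Int :=
  if _h : l < r then
    let mid := PySem.Int.floordiv (l + r) 2
    if check mid then pvLoopA check l mid else pvLoopA check (mid + 1) r
  else r
termination_by (r - l).toNat
decreasing_by
  all_goals
    have h1 := (PySem.Int.le_floordiv_iff_mul_le (a := l + r) (b := 2) (q := l) (by norm_num)).mpr (by linarith)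
    have h2 := (PySem.Int.floordiv_lt_iff_lt_mul (a := l + r) (b := 2) (q := r) (by norm_num)).mpr (by linarith)
    omega

def minimizeSet (divisor1 : Int) (divisor2 : Int) (uniqueCnt1 : Int) (uniqueCnt2 : Int) : Int :=
  let dlcm : Int := (Int.lcm divisor1 divisor2 : Int)
  -- l, r = 1, 10 ** 15
  pvLoopA (pvCheckA dlcm divisor1 divisor2 uniqueCnt1 uniqueCnt2) 1 1000000000000000

-- ===== PORT B =====
-- Source B's _first_x: smallest positive x such that [1, x] has at least c integers not divisible by d
def pvFirstX (d c : Int) : Int :=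
  if c ≤ 0 then 1
  else
    let q := PySem.Int.floordiv (c - 1) (d - 1)
    let r := PySem.Int.mod (c - 1) (d - 1)
    q * d + r + 1

def minimizeSet_alt (divisor1 : Int) (divisor2 : Int) (uniqueCnt1 : Int) (uniqueCnt2 : Int) : Int :=
  max (pvFirstX divisor1 uniqueCnt1)
    (max (pvFirstX divisor2 uniqueCnt2)
      (pvFirstX (Int.lcm divisor1 divisor2 : Int) (uniqueCnt1 + uniqueCnt2)))

-- ===== PRECONDITION & SPEC =====
-- Pre_ excludes divisors equal to 0, where A raises ZeroDivisionError, and the infeasible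
-- configurations where divisor1, divisor2 or their lcm is 1 while the corresponding count is
-- positive: there no valid x exists, A returns its binary-search cap 10**15 (not an answer),
-- and B's closed form raises ZeroDivisionError.
def Pre_minimizeSet (divisor1 : Int) (divisor2 : Int) (uniqueCnt1 : Int) (uniqueCnt2 : Int) : Prop :=
  divisor1 ≠ 0 ∧ divisor2 ≠ 0 ∧
  (divisor1 = 1 → uniqueCnt1 ≤ 0) ∧ (divisor2 = 1 → uniqueCnt2 ≤ 0) ∧
  ((Int.lcm divisor1 divisor2 : Int) = 1 → uniqueCnt1 + uniqueCnt2 ≤ 0)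
instance (divisor1 : Int) (divisor2 : Int) (uniqueCnt1 : Int) (uniqueCnt2 : Int) : Decidable (Pre_minimizeSet divisor1 divisor2 uniqueCnt1 uniqueCnt2) := by unfold Pre_minimizeSet; infer_instance
def pvWitness_minimizeSet : Int × Int × Int × Int := (2, 7, 3, 4)

def Spec_minimizeSet (divisor1 : Int) (divisor2 : Int) (uniqueCnt1 : Int) (uniqueCnt2 : Int) (out : Int) : Prop := out = minimizeSet_alt divisor1 divisor2 uniqueCnt1 uniqueCnt2
instance (divisor1 : Int) (divisor2 : Int) (uniqueCnt1 : Int) (uniqueCnt2 : Int) (out : Int) : Decidable (Spec_minimizeSet divisor1 divisor2 uniqueCnt1 uniqueCnt2 out) := by unfold Spec_minimizeSet; infer_instance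

-- ===== CLAIM (what is proved, stated in full; the proofs are below) =====
def Claim_equal_minimizeSet : Prop := ∀ (divisor1 : Int) (divisor2 : Int) (uniqueCnt1 : Int) (uniqueCnt2 : Int), Dom_minimizeSet divisor1 divisor2 uniqueCnt1 uniqueCnt2 → Pre_minimizeSet divisor1 divisor2 uniqueCnt1 uniqueCnt2 → Spec_minimizeSet divisor1 divisor2 uniqueCnt1 uniqueCnt2 (minimizeSet divisor1 divisor2 uniqueCnt1 uniqueCnt2)

-- ===== LEMMAS AND PROOFS =====

-- one step of x ↦ x // d moves by at most 1 (any d ≠ 0)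
theorem pvFdivStep (d x : Int) (hd : d ≠ 0) :
    PySem.Int.floordiv (x + 1) d ≤ PySem.Int.floordiv x d + 1 := by
  rcases lt_or_gt_of_ne hd with hneg | hpos
  · have e1 : PySem.Int.floordiv (x + 1) d = -(x + 1) / -d := by
      rw [← PySem.Int.floordiv_neg_neg (x + 1) d, PySem.Int.floordiv_eq_ediv_of_pos (by omega)]
    have e2 : PySem.Int.floordiv x d = -x / -d := by
      rw [← PySem.Int.floordiv_neg_neg x d, PySem.Int.floordiv_eq_ediv_of_pos (by omega)]
    have h := Int.ediv_le_ediv (show (0:Int) < -d by omega) (show -(x + 1) ≤ -x by omega)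
    omega
  · rw [PySem.Int.floordiv_eq_ediv_of_pos hpos, PySem.Int.floordiv_eq_ediv_of_pos hpos]
    have h1 : (x + 1) / d ≤ (x + 1 * d) / d := Int.ediv_le_ediv hpos (by omega)
    rw [Int.add_mul_ediv_right _ _ (show d ≠ 0 by omega)] at h1
    omega

-- x ↦ x - x // d is monotone (any d ≠ 0)
theorem pvGMono (d : Int) (hd : d ≠ 0) {x y : Int} (hxy : x ≤ y) :
    x - PySem.Int.floordiv x d ≤ y - PySem.Int.floordiv y d := by
  induction y, hxy using Int.le_induction with
  | base => exact le_refl _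
  | succ y hy ih =>
      have := pvFdivStep d y hd
      omega

-- value of x // d for negative d, from the bracket (q+1)*d < x ≤ q*d
theorem pvFdivNegEq (x d q : Int) (hd : d < 0) (hlo : (q + 1) * d < x) (hhi : x ≤ q * d) :
    PySem.Int.floordiv x d = q := by
  have hrw : PySem.Int.floordiv x d = PySem.Int.floordiv (-x) (-d) := by
    have h := PySem.Int.floordiv_neg_neg (-x) (-d)
    simp only [neg_neg] at h
    exact h
  rw [hrw, PySem.Int.floordiv_eq_iff_of_pos (by omega)]
  constructor <;> nlinarith

-- characterisation of pvFirstX on the admitted divisors: least point of the constraint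
theorem pvFirstX_spec (d c : Int) (hd : d ≠ 0) (h1 : d = 1 → c ≤ 0) :
    1 ≤ pvFirstX d c ∧
    c ≤ pvFirstX d c - PySem.Int.floordiv (pvFirstX d c) d ∧
    ∀ x : Int, 1 ≤ x → x < pvFirstX d c → x - PySem.Int.floordiv x d < c := by
  by_cases hc0 : c ≤ 0
  · have hv : pvFirstX d c = 1 := by simp [pvFirstX, hc0]
    rw [hv]
    refine ⟨le_refl _, ?_, by intro x hx hxl; omega⟩
    rcases lt_or_gt_of_ne hd with hneg | hpos
    · have := pvFdivNegEq 1 d (-1) hneg (by omega) (by omega)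
      omega
    · have h1 : PySem.Int.floordiv 1 d ≤ 1 := by
        rw [PySem.Int.floordiv_eq_ediv_of_pos hpos]
        exact Int.ediv_le_self _ (by omega)
      omega
  · have hc1 : 1 ≤ c := by omega
    have hd1 : d ≠ 1 := fun h => absurd (h1 h) (by omega)
    have hv : pvFirstX d c =
        PySem.Int.floordiv (c - 1) (d - 1) * d + PySem.Int.mod (c - 1) (d - 1) + 1 := by
      simp [pvFirstX, hc0]
    set q := PySem.Int.floordiv (c - 1) (d - 1) with hqdef
    set r := PySem.Int.mod (c - 1) (d - 1) with hrdef
    have hqr : q * (d - 1) + r = c - 1 := PySem.Int.floordiv_mul_add_mod _ _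
    by_cases hdgt : 1 < d
    · -- d ≥ 2
      have hr0 : 0 ≤ r := PySem.Int.mod_nonneg _ (by omega)
      have hrlt : r < d - 1 := PySem.Int.mod_lt _ (by omega)
      have hq0 : 0 ≤ q := by nlinarith
      have hfdv : PySem.Int.floordiv (q * d + r + 1) d = q := by
        rw [PySem.Int.floordiv_eq_iff_of_pos (by omega)]
        constructor <;> nlinarith
      have hfdv1 : PySem.Int.floordiv (q * d + r) d = q := by
        rw [PySem.Int.floordiv_eq_iff_of_pos (by omega)]
        constructor <;> nlinarith
      rw [hv]
      refine ⟨by nlinarith, ?_, ?_⟩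
      · rw [hfdv]; nlinarith
      · intro x hx hxl
        have hmono := pvGMono d hd (show x ≤ q * d + r by omega)
        rw [hfdv1] at hmono
        nlinarith
    · -- d ≤ -1
      have hdneg : d < 0 := by omega
      obtain ⟨hrl, hru⟩ := PySem.Int.mod_neg_bounds (a := c - 1) (b := d - 1) (by omega)
      rw [← hrdef] at hrl hru
      have hq0 : q ≤ 0 := by nlinarith
      have hv1 : 1 ≤ q * d + r + 1 := by
        by_cases hq : q = 0
        · have : r = c - 1 := by rw [hq] at hqr; linarith
          nlinarith
        · have hq' : q ≤ -1 := by omega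
          nlinarith
      rw [hv]
      refine ⟨hv1, ?_, ?_⟩
      · by_cases hr : r = 0
        · have hfd : PySem.Int.floordiv (q * d + r + 1) d = q - 1 := by
            apply pvFdivNegEq _ _ _ hdneg <;> nlinarith
          rw [hfd]; nlinarith
        · have hr' : r ≤ -1 := by omega
          have hfd : PySem.Int.floordiv (q * d + r + 1) d = q := by
            apply pvFdivNegEq _ _ _ hdneg <;> nlinarith
          rw [hfd]; nlinarith
      · intro x hx hxl
        have hprev : (q * d + r) - PySem.Int.floordiv (q * d + r) d ≤ c - 1 := by
          by_cases hr : r = 0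
          · have hfd : PySem.Int.floordiv (q * d + r) d = q := by
              apply pvFdivNegEq _ _ _ hdneg <;> nlinarith
            rw [hfd]; nlinarith
          · by_cases hrd : r = d
            · have hfd : PySem.Int.floordiv (q * d + r) d = q + 1 := by
                apply pvFdivNegEq _ _ _ hdneg <;> nlinarith
              rw [hfd]; nlinarith
            · have hrd' : d < r := by omega
              have hfd : PySem.Int.floordiv (q * d + r) d = q := by
                apply pvFdivNegEq _ _ _ hdneg <;> nlinarith
              rw [hfd]; nlinarith
        have hmono := pvGMono d hd (show x ≤ q * d + r by omega)
        omega

-- within the claimed domain the threshold never exceeds A's search bound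
theorem pvFirstX_cap (d c : Int) (hd : d ≠ 0) (h1 : d = 1 → c ≤ 0) (hc : c ≤ 4294967296) :
    pvFirstX d c ≤ 1000000000000000 := by
  by_cases hc0 : c ≤ 0
  · rw [show pvFirstX d c = 1 from by simp [pvFirstX, hc0]]
    norm_num
  have hd1 : d ≠ 1 := fun h => absurd (h1 h) (by omega)
  have hv : pvFirstX d c =
      PySem.Int.floordiv (c - 1) (d - 1) * d + PySem.Int.mod (c - 1) (d - 1) + 1 := by
    simp [pvFirstX, hc0]
  set q := PySem.Int.floordiv (c - 1) (d - 1) with hqdef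
  set r := PySem.Int.mod (c - 1) (d - 1) with hrdef
  have hqr : q * (d - 1) + r = c - 1 := PySem.Int.floordiv_mul_add_mod _ _
  -- the value is always c + q
  have hval : q * d + r + 1 = c + q := by nlinarith [show q * d = q * (d - 1) + q from by ring]
  by_cases hdgt : 1 < d
  · have hq_le : q ≤ c - 1 := by
      rw [hqdef, PySem.Int.floordiv_eq_ediv_of_pos (by omega)]
      exact Int.ediv_le_self _ (by omega)
    rw [hv]; omega
  · have hru : r ≤ 0 := (PySem.Int.mod_neg_bounds (a := c - 1) (b := d - 1) (by omega)).2
    have hq0 : q ≤ 0 := by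
      by_contra hq
      push Not at hq
      have h := mul_le_mul_of_nonneg_left (show d - 1 ≤ -1 by omega) (show (0:Int) ≤ q by omega)
      nlinarith
    rw [hv]; omega

-- what the binary-search loop returns: the least admissible point (given a monotone check)
theorem pvLoopA_spec (check : Int → Bool)
    (hmono : ∀ x y : Int, x ≤ y → check x = true → check y = true) :
    ∀ n : Nat, ∀ l r : Int, (r - l).toNat = n → l ≤ r →
      l ≤ pvLoopA check l r ∧ pvLoopA check l r ≤ r ∧
      (∀ x, l ≤ x → x < pvLoopA check l r → check x = false) ∧
      (check (pvLoopA check l r) = true ∨ pvLoopA check l r = r) := by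
  intro n
  induction n using Nat.strong_induction_on with
  | _ n ih =>
    intro l r hn hlr
    rw [pvLoopA]
    by_cases hlt : l < r
    · simp only [dif_pos hlt]
      have hm1 := (PySem.Int.le_floordiv_iff_mul_le (a := l + r) (b := 2) (q := l) (by norm_num)).mpr (by linarith)
      have hm2 := (PySem.Int.floordiv_lt_iff_lt_mul (a := l + r) (b := 2) (q := r) (by norm_num)).mpr (by linarith)
      set mid := PySem.Int.floordiv (l + r) 2 with hmid
      cases hcheck : check mid
      · rw [if_neg (show ¬(false = true) by simp)]
        obtain ⟨ih1, ih2, ih3, ih4⟩ :=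
          ih ((r - (mid + 1)).toNat) (by omega) (mid + 1) r rfl (by omega)
        refine ⟨by omega, ih2, ?_, ih4⟩
        intro x hx hxlt
        by_cases hxm : mid + 1 ≤ x
        · exact ih3 x hxm hxlt
        · cases hcx : check x
          · rfl
          · have := hmono x mid (by omega) hcx
            rw [hcheck] at this
            exact absurd this (by simp)
      · rw [if_pos (show (true = true) from rfl)]
        obtain ⟨ih1, ih2, ih3, ih4⟩ :=
          ih ((mid - l).toNat) (by omega) l mid rfl (by omega)
        refine ⟨ih1, by omega, ih3, ?_⟩
        rcases ih4 with h | h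
        · exact Or.inl h
        · exact Or.inl (by rw [h]; exact hcheck)
    · rw [dif_neg hlt]
      exact ⟨hlr, le_refl _, by intro x hx hxlt; omega, Or.inr rfl⟩

-- the three characterising properties pin the result down uniquely
theorem pvLeastUnique (check : Int → Bool) (l r m1 m2 : Int)
    (h1 : l ≤ m1 ∧ m1 ≤ r ∧ (∀ x, l ≤ x → x < m1 → check x = false) ∧ (check m1 = true ∨ m1 = r))
    (h2 : l ≤ m2 ∧ m2 ≤ r ∧ (∀ x, l ≤ x → x < m2 → check x = false) ∧ (check m2 = true ∨ m2 = r)) :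
    m1 = m2 := by
  by_contra hne
  rcases lt_or_gt_of_ne hne with hlt | hgt
  · have hf := h2.2.2.1 m1 h1.1 hlt
    rcases h1.2.2.2 with hc | hr
    · rw [hf] at hc; exact absurd hc (by simp)
    · omega
  · have hf := h1.2.2.1 m2 h2.1 hgt
    rcases h2.2.2.2 with hc | hr
    · rw [hf] at hc; exact absurd hc (by simp)
    · omega

theorem pvCheckA_iff (L d1 d2 c1 c2 x : Int) :
    pvCheckA L d1 d2 c1 c2 x = true ↔
      c1 + c2 ≤ x - PySem.Int.floordiv x L ∧
      c1 ≤ x - PySem.Int.floordiv x d1 ∧ c2 ≤ x - PySem.Int.floordiv x d2 := by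
  simp [pvCheckA, ge_iff_le]

-- ===== VERDICT (by name: the statement is the Claim_ definition above) =====
theorem minimizeSet_spec : Claim_equal_minimizeSet := by
  unfold Claim_equal_minimizeSet Spec_minimizeSet
  intro d1 d2 c1 c2 hdom hpre
  obtain ⟨hd1, hd2, hp1, hp2, hpL⟩ := hpre
  simp only [Dom_minimizeSet, Bool.and_eq_true] at hdom
  obtain ⟨⟨⟨_, _⟩, hdc1⟩, hdc2⟩ := hdom
  simp only [pvDomInt, decide_eq_true_eq] at hdc1 hdc2
  have hc1 : c1 ≤ 2147483648 := hdc1.2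
  have hc2 : c2 ≤ 2147483648 := hdc2.2
  set L : Int := (Int.lcm d1 d2 : Int) with hLdef
  have hLne : L ≠ 0 := by
    have h := Nat.lcm_ne_zero (Int.natAbs_ne_zero.mpr hd1) (Int.natAbs_ne_zero.mpr hd2)
    simp only [hLdef, Int.lcm]
    exact_mod_cast h
  simp only [minimizeSet, minimizeSet_alt]
  set check := pvCheckA L d1 d2 c1 c2 with hcheckdef
  set v1 := pvFirstX d1 c1 with hv1def
  set v2 := pvFirstX d2 c2 with hv2def
  set v3 := pvFirstX L (c1 + c2) with hv3def
  have hcap1 : v1 ≤ 1000000000000000 := pvFirstX_cap _ _ hd1 hp1 (by omega)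
  have hcap2 : v2 ≤ 1000000000000000 := pvFirstX_cap _ _ hd2 hp2 (by omega)
  have hcap3 : v3 ≤ 1000000000000000 := pvFirstX_cap _ _ hLne hpL (by omega)
  set M := max v1 (max v2 v3) with hMdef
  have hmono : ∀ x y : Int, x ≤ y → check x = true → check y = true := by
    intro x y hxy hx
    rw [hcheckdef, pvCheckA_iff] at hx ⊢
    have m1 := pvGMono L hLne hxy
    have m2 := pvGMono d1 hd1 hxy
    have m3 := pvGMono d2 hd2 hxy
    omega
  have hA := pvLoopA_spec check hmono ((1000000000000000 - 1 : Int).toNat) 1 1000000000000000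
    (by norm_num) (by norm_num)
  apply pvLeastUnique check 1 1000000000000000 _ M hA
  obtain ⟨s1a, s1b, s1c⟩ := pvFirstX_spec d1 c1 hd1 hp1
  obtain ⟨s2a, s2b, s2c⟩ := pvFirstX_spec d2 c2 hd2 hp2
  obtain ⟨s3a, s3b, s3c⟩ := pvFirstX_spec L (c1 + c2) hLne hpL
  rw [← hv1def] at s1a s1b s1c
  rw [← hv2def] at s2a s2b s2c
  rw [← hv3def] at s3a s3b s3c
  refine ⟨by omega, by omega, ?_, Or.inl ?_⟩
  · intro x hx hxM
    apply Bool.eq_false_iff.mpr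
    intro hcx
    rw [hcheckdef, pvCheckA_iff] at hcx
    have hsplit : x < v1 ∨ x < v2 ∨ x < v3 := by omega
    rcases hsplit with h | h | h
    · have := s1c x hx h; omega
    · have := s2c x hx h; omega
    · have := s3c x hx h; omega
  · rw [hcheckdef, pvCheckA_iff]
    have e1 : v1 ≤ M := by omega
    have e2 : v2 ≤ M := by omega
    have e3 : v3 ≤ M := by omega
    have g1 := pvGMono d1 hd1 e1
    have g2 := pvGMono d2 hd2 e2
    have g3 := pvGMono L hLne e3
    omega
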